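-- pv_equiv track=rewrite | github.com/bferris57/BEFE | BEFE/BEFE/python/demo/functions.py | StatementType
-- ===== SOURCE A (Python) =====
-- def StatementType(stmt):
--   if type(stmt) != str:
--     return None
--   s = ''
--   for c in stmt:
--     if c == ' ':
--       if s: break
--       continue
--     s += c
--   return s
-- ===== SOURCE B (Python) =====
-- def StatementType(stmt):
--     if type(stmt) != str:
--         return None
--     s = stmt.lstrip(' ')
--     i = s.find(' ')
--     return s if i < 0 else s[:i]
-- ===== Notes on version B (the rewrite author's own statement) =====
-- stated objective: simpler
-- what changed: Replaced the explicit per-character accumulator loop with library string operations (lstrip(' ') then find(' ')/slice), which also avoids quadratic string concatenation in Python.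
import Mathlib
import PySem

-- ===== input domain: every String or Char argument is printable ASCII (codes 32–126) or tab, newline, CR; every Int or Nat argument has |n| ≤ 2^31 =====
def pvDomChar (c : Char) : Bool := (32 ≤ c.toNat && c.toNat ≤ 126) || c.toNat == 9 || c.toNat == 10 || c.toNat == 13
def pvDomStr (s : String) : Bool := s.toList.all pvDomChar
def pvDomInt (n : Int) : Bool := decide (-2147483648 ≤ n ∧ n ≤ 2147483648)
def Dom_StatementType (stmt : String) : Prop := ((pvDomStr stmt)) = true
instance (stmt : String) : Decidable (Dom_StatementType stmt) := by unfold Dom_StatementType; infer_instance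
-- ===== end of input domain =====

-- B replaces A's accumulator loop with lstrip(' ') + find(' ')/slice (objective: simpler).

-- ===== PORT A =====
-- the accumulator loop: space with nonempty s breaks, space with empty s continues, else s += c
def pvGoA (acc : List Char) : List Char → List Char
  | [] => acc
  | c :: rest =>
    if c = ' ' then (if acc.isEmpty then pvGoA acc rest else acc)
    else pvGoA (acc ++ [c]) rest

def StatementType (stmt : String) : Option String :=
  -- 'type(stmt) != str' is impossible for stmt : String, so the None branch never fires
  some (String.ofList (pvGoA [] stmt.toList))

-- ===== PORT B =====
def StatementType_alt (stmt : String) : Option String :=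
  -- stmt.lstrip(' ') with the single stripped character ' ' is exactly dropWhile (· == ' ')
  let s := stmt.toList.dropWhile (· == ' ')
  let i := PySem.Chars.find s [' ']
  if i < 0 then some (String.ofList s) else some (String.ofList (PySem.List.slice s none (some i)))

-- ===== PRECONDITION & SPEC =====
def Spec_StatementType (stmt : String) (out : Option String) : Prop := out = StatementType_alt stmt
instance (stmt : String) (out : Option String) : Decidable (Spec_StatementType stmt out) := by unfold Spec_StatementType; infer_instance

-- ===== CLAIM (what is proved, stated in full; the proofs are below) =====
def Claim_equal_StatementType : Prop := ∀ (stmt : String), Dom_StatementType stmt → Spec_StatementType stmt (StatementType stmt)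

-- ===== LEMMAS AND PROOFS =====

-- with a nonempty accumulator the loop appends exactly the chars up to the first space
theorem pvGoA_nonempty (t acc : List Char) (h : ¬ acc.isEmpty) :
    pvGoA acc t = acc ++ t.takeWhile (· != ' ') := by
  induction t generalizing acc with
  | nil => simp [pvGoA]
  | cons c rest ih =>
    by_cases hc : c = ' '
    · simp [pvGoA, hc, h, List.takeWhile]
    · have hc' : (c != ' ') = true := by simp [hc]
      simp [pvGoA, hc, hc', ih (acc ++ [c]) (by simp)]

-- the loop = takeWhile ∘ dropWhile
theorem pvGoA_eq (t : List Char) :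
    pvGoA [] t = (t.dropWhile (· == ' ')).takeWhile (· != ' ') := by
  induction t with
  | nil => simp [pvGoA]
  | cons c rest ih =>
    by_cases hc : c = ' '
    · simp [pvGoA, hc, List.dropWhile, ih]
    · have hc' : (c != ' ') = true := by simp [hc]
      simp [pvGoA, hc, hc', pvGoA_nonempty rest [c] (by simp)]

-- take up to the first space = takeWhile, from find's specification
theorem take_eq_takeWhile (t : List Char) (n : Nat)
    (hn : ∀ i (_h : i < n) (hi : i < t.length), t[i] ≠ ' ')
    (hsp : ∀ (h : n < t.length), t[n] = ' ') :
    t.take n = t.takeWhile (· != ' ') := by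
  induction t generalizing n with
  | nil => simp
  | cons c rest ih =>
    cases n with
    | zero =>
      have := hsp (by simp)
      simp at this
      simp [List.takeWhile, this]
    | succ m =>
      have hc : c ≠ ' ' := hn 0 (Nat.succ_pos m) (by simp)
      have hc' : (c != ' ') = true := by simp [hc]
      simp only [List.take_succ_cons, List.takeWhile_cons, hc', if_true, List.cons.injEq, true_and]
      exact ih m (fun i h hi => by
          have := hn (i+1) (by omega) (by simp; omega)
          simpa using this)
        (fun h => by
          have := hsp (by simp; omega)
          simpa using this)

-- B's find/slice step computes takeWhile on any list
theorem find_slice_eq (t : List Char) :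
    (if PySem.Chars.find t [' '] < 0 then t
     else PySem.List.slice t none (some (PySem.Chars.find t [' ']))) =
    t.takeWhile (· != ' ') := by
  by_cases h : PySem.Chars.find t [' '] = -1
  · rw [if_pos (by omega)]
    have hni : ¬ ([' '] <:+: t) := (PySem.Chars.find_eq_neg_one_iff t [' ']).1 h
    have hmem : ' ' ∉ t := fun hm => hni ((List.singleton_infix_iff ' ' t).2 hm)
    exact (List.takeWhile_eq_self_iff.mpr (fun x hx => by
      simp only [bne_iff_ne, ne_eq]
      exact fun hxe => hmem (hxe ▸ hx))).symm
  · have hpos : 0 ≤ PySem.Chars.find t [' '] := by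
      have := PySem.Chars.neg_one_le_find t [' ']
      omega
    rw [if_neg (by omega), PySem.List.slice_to _ hpos]
    obtain ⟨hpre, hmin⟩ := PySem.Chars.find_spec hpos
    have hpref : ∀ (l : List Char) (c : Char), [c] <+: l ↔ l.head? = some c := by
      intro l c; cases l with
      | nil => simp
      | cons a s => simp [List.cons_prefix_cons, eq_comm]
    apply take_eq_takeWhile
    · intro i hi hil hspace
      exact hmin i hi (((hpref _ ' ').2 (by rw [List.head?_drop, List.getElem?_eq_getElem hil, hspace])))
    · intro hlt
      have := (hpref _ ' ').1 hpre
      rw [List.head?_drop] at this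
      simpa [List.getElem?_eq_getElem hlt] using this

theorem pvB_eq (stmt : String) :
    StatementType_alt stmt =
      some (String.ofList ((stmt.toList.dropWhile (· == ' ')).takeWhile (· != ' '))) := by
  show (if PySem.Chars.find (stmt.toList.dropWhile (· == ' ')) [' '] < 0 then
        some (String.ofList (stmt.toList.dropWhile (· == ' ')))
      else some (String.ofList (PySem.List.slice (stmt.toList.dropWhile (· == ' ')) none
        (some (PySem.Chars.find (stmt.toList.dropWhile (· == ' ')) [' '])))))
      = some (String.ofList ((stmt.toList.dropWhile (· == ' ')).takeWhile (· != ' ')))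
  rw [← apply_ite (fun l => some (String.ofList l)), find_slice_eq]

-- ===== VERDICT (by name: the statement is the Claim_ definition above) =====
theorem StatementType_spec : Claim_equal_StatementType := by
  intro stmt _
  unfold Spec_StatementType
  rw [pvB_eq]
  unfold StatementType
  rw [pvGoA_eq]
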